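-- pv_equiv track=rewrite | github.com/giaabaoo/Bag-Of-Visual-Words | vector_space_model.py | calc_DF
-- ===== SOURCE A (Python) =====
-- def calc_DF(vocab, data):
--     df_dict = {}
--     for word in vocab:
--         f = 0
--         for doc in data.values():
--             if word in doc:
--                 f += 1
--         df_dict[word] = f
--     return df_dict
-- ===== SOURCE B (Python) =====
-- def calc_DF(vocab, data):
--     # One pass over the documents: count, for each word, how many docs contain it,
--     # then read the vocab words off that inverted count table.
--     counts = {}
--     for doc in data.values():
--         for w in set(doc):
--             counts[w] = counts.get(w, 0) + 1
--     return {w: counts.get(w, 0) for w in vocab}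
-- ===== Notes on version B (the rewrite author's own statement) =====
-- stated objective: faster
-- what changed: Instead of scanning every document once per vocab word, B makes a single pass over the documents building a table of per-word document counts (deduplicating each doc with set), then reads each vocab word's count off the table.
import Mathlib
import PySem

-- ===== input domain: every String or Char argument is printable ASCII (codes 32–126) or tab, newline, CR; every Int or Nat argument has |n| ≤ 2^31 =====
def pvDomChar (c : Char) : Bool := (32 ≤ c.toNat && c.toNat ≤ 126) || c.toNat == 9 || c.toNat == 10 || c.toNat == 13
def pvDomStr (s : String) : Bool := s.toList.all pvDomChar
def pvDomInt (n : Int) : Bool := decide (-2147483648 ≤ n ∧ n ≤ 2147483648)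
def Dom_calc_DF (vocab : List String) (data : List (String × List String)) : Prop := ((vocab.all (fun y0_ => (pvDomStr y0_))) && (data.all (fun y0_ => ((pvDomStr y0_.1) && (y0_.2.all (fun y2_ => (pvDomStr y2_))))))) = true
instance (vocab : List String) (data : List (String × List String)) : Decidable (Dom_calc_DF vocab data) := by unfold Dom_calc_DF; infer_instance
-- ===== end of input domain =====

-- B replaces A's per-vocab-word scan of all documents by one pass over the documents
-- building an inverted count table; objective: faster (asymptotic).

-- ===== PORT A =====
-- for word in vocab: scan all of data.values(), count docs containing word, df_dict[word] = f
def calc_DF (vocab : List String) (data : List (String × List String)) : List (String × Int) :=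
  (vocab.foldl
    (fun df word =>
      df.insert word
        (((PySem.Dict.ofList data).values).foldl
          (fun f doc => if word ∈ doc then f + 1 else f) (0 : Int)))
    (PySem.Dict.empty : PySem.Dict String Int)).items

-- ===== PORT B =====
-- counts = {}: for doc in data.values(): for w in set(doc): counts[w] += 1; then {w: counts.get(w,0) for w in vocab}
def calc_DF_alt (vocab : List String) (data : List (String × List String)) : List (String × Int) :=
  let counts : PySem.Dict String Int :=
    ((PySem.Dict.ofList data).values).foldl
      (fun c doc => (PySem.Set.ofList doc).foldl (fun c w => c.modify w 0 (· + 1)) c)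
      PySem.Dict.empty
  (vocab.foldl (fun r w => r.insert w (counts.getD w 0))
    (PySem.Dict.empty : PySem.Dict String Int)).items

-- ===== PRECONDITION & SPEC =====
def Spec_calc_DF (vocab : List String) (data : List (String × List String)) (out : List (String × Int)) : Prop := out = calc_DF_alt vocab data
instance (vocab : List String) (data : List (String × List String)) (out : List (String × Int)) : Decidable (Spec_calc_DF vocab data out) := by unfold Spec_calc_DF; infer_instance

-- ===== CLAIM (what is proved, stated in full; the proofs are below) =====
def Claim_equal_calc_DF : Prop := ∀ (vocab : List String) (data : List (String × List String)), Dom_calc_DF vocab data → Spec_calc_DF vocab data (calc_DF vocab data)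

-- ===== LEMMAS AND PROOFS =====

-- A's inner scan over the documents is a countP of the documents containing w.
theorem calcDF_inner_A (w : String) (docs : List (List String)) :
    docs.foldl (fun f doc => if w ∈ doc then f + 1 else f) (0 : Int)
      = (docs.countP (fun doc => decide (w ∈ doc)) : Int) := by
  simpa using PySem.List.foldl_count_if (fun doc => decide (w ∈ doc)) docs 0

-- B's inverted table holds, at key w, the number of documents containing w.
theorem calcDF_counts_getD (docs : List (List String)) (c : PySem.Dict String Int) (w : String) :
    (docs.foldl (fun c doc => (PySem.Set.ofList doc).foldl (fun c w => c.modify w 0 (· + 1)) c) c).getD w 0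
      = c.getD w 0 + (docs.countP (fun doc => decide (w ∈ doc)) : Int) := by
  induction docs generalizing c with
  | nil => simp
  | cons doc rest ih =>
    rw [List.foldl_cons, ih, PySem.Dict.getD_foldl_modify_add_one, List.countP_cons]
    by_cases h : w ∈ doc
    · rw [List.count_eq_one_of_mem (PySem.Set.nodup_ofList doc)
        ((PySem.Set.mem_ofList doc w).mpr h)]
      simp [h]
      ring
    · rw [List.count_eq_zero_of_not_mem (fun hm => h ((PySem.Set.mem_ofList doc w).mp hm))]
      simp [h]

-- ===== VERDICT (by name: the statement is the Claim_ definition above) =====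
theorem calc_DF_spec : Claim_equal_calc_DF := by
  intro vocab data _
  unfold Spec_calc_DF calc_DF calc_DF_alt
  congr 1
  apply PySem.List.foldl_congr_mem
  intro acc w _
  rw [calcDF_inner_A, calcDF_counts_getD]
  simp
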